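-- pv_equiv track=rewrite | github.com/HannaAbiAkl/DSL | Lesson3/problem set/reading_machine_minds_2.py | cfgempty
-- ===== SOURCE A (Python) =====
-- def cfgempty(grammar, symbol, visited):
--     if symbol in visited:
--         # no infinite loops!
--         return None
--     elif not any([ rule[0] == symbol for rule in grammar ]):
--         # base case: 'symbol' is a terminal
--         return [symbol]
--     else:
--         new_visited = visited + [symbol]
--         # consider every rewrite rule "Symbol -> RHS"
--         for rhs in [r[1] for r in grammar if r[0] == symbol]:
--             # check if every part of RHS is non-empty
--             if all([None != cfgempty(grammar, r, new_visited) for r in rhs]):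
--                 result = [] # gather up the result
--                 for r in rhs:
--                     result = result + cfgempty(grammar, r, new_visited)
--                 return result
--         # didn't find any
--         return None
-- ===== SOURCE B (Python) =====
-- def cfgempty(grammar, symbol, visited):
--     if symbol in visited:
--         return None
--     rules = [r[1] for r in grammar if r[0] == symbol]
--     if not rules:
--         return [symbol]
--     new_visited = visited + [symbol]
--     for rhs in rules:
--         parts = []
--         for r in rhs:
--             sub = cfgempty(grammar, r, new_visited)
--             if sub is None:
--                 break
--             parts.extend(sub)
--         else:
--             return parts
--     return None
-- ===== Notes on version B (the rewrite author's own statement) =====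
-- stated objective: alternative
-- what changed: B derives each RHS in a single accumulating pass that breaks on the first underivable part, replacing A's per-rule two-phase recursion (an all(...) check pass followed by a full re-derivation pass to gather the result).
import Mathlib
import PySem

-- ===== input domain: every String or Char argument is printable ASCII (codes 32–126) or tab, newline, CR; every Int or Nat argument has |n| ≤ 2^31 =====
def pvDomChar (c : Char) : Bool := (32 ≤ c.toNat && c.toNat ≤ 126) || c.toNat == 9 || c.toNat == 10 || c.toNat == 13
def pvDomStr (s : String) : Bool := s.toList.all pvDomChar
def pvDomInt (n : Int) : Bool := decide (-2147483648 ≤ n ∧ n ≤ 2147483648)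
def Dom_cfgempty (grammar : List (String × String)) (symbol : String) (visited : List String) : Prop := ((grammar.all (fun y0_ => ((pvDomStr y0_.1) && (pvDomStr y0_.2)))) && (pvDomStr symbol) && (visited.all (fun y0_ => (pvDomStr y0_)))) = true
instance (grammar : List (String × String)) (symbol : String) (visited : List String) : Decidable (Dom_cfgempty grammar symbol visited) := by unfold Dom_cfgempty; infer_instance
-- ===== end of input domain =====

-- B is a single-pass rewrite of A: for each rule it derives the RHS characters once,
-- accumulating the parts and aborting on the first failing part, instead of A's
-- check-then-regather double recursion per rule (objective: alternative decomposition).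

-- termination measure: number of grammar rules whose head is not yet visited
def countFresh (g : List (String × String)) (v : List String) : Nat :=
  (g.filter (fun r => decide (r.1 ∉ v))).length

theorem filterLen_le {α : Type} (p q : α → Bool) (l : List α)
    (h : ∀ a, p a = true → q a = true) :
    (l.filter p).length ≤ (l.filter q).length := by
  induction l with
  | nil => simp
  | cons b t ih =>
    rw [List.filter_cons, List.filter_cons]
    cases hp : p b
    · cases hq : q b <;> simp <;> omega
    · rw [h b hp]; simpa using ih

theorem filterLen_lt {α : Type} (p q : α → Bool) (l : List α)
    (h : ∀ a, p a = true → q a = true)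
    (a : α) (ha : a ∈ l) (hq : q a = true) (hp : p a = false) :
    (l.filter p).length < (l.filter q).length := by
  induction l with
  | nil => cases ha
  | cons b t ih =>
    rw [List.filter_cons, List.filter_cons]
    rcases List.mem_cons.1 ha with rfl | hm
    · rw [hp, hq]
      have := filterLen_le p q t h
      simp only [Bool.false_eq_true, if_false, if_true, List.length_cons]
      omega
    · cases hpb : p b
      · cases hqb : q b
        · simpa using ih hm
        · simpa using Nat.lt_succ_of_lt (ih hm)
      · rw [h b hpb]
        simpa using Nat.succ_lt_succ (ih hm)

theorem rulesEmpty_iff (g : List (String × String)) (s : String) :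
    ((g.filter (fun r => r.1 == s)).map Prod.snd).isEmpty
      = !(g.any (fun r => r.1 == s)) := by
  induction g with
  | nil => rfl
  | cons r t ih =>
    rw [List.filter_cons, List.any_cons]
    cases h : (r.1 == s) <;> simp [ih]

theorem countFresh_lt (g : List (String × String)) (v : List String) (s : String)
    (hs : s ∉ v) (hr : g.any (fun r => r.1 == s) = true) :
    countFresh g (v ++ [s]) < countFresh g v := by
  simp only [List.any_eq_true, beq_iff_eq] at hr
  obtain ⟨r, hrm, hrs⟩ := hr
  refine filterLen_lt _ _ g ?_ r hrm ?_ ?_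
  · intro a ha
    simp only [decide_eq_true_eq] at ha ⊢
    intro hmem
    exact ha (List.mem_append_left _ hmem)
  · simpa using hrs ▸ hs
  · simp [hrs]

theorem countFresh_lt_of_rules (g : List (String × String)) (v : List String) (s : String)
    (hs : s ∉ v) (hr : ¬ (((g.filter (fun r => r.1 == s)).map Prod.snd).isEmpty = true)) :
    countFresh g (v ++ [s]) < countFresh g v := by
  apply countFresh_lt g v s hs
  rw [rulesEmpty_iff] at hr
  cases h : g.any (fun r => r.1 == s)
  · exact absurd (by rw [h]; rfl) hr
  · rfl

-- ===== PORT A =====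
mutual
-- literal port of A: membership test, terminal test via any, then for each matching
-- rule check all parts derive (cfgCheck) and, if so, regather by re-deriving (cfgGather)
def cfgempty (grammar : List (String × String)) (symbol : String) (visited : List String) : Option (List String) :=
  if _h1 : symbol ∈ visited then none
  else if _h2 : ¬ (grammar.any (fun rule => rule.1 == symbol) = true) then some [symbol]
  else
    cfgLoop grammar ((grammar.filter (fun r => r.1 == symbol)).map Prod.snd) (visited ++ [symbol])
termination_by (countFresh grammar visited, 0, 0)
decreasing_by
  refine Prod.Lex.left _ _ ?_
  exact countFresh_lt grammar visited symbol _h1 (by simpa using _h2)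

-- the 'for rhs in ...' loop of A
def cfgLoop (grammar : List (String × String)) (rhss : List String) (nv : List String) : Option (List String) :=
  match rhss with
  | [] => none
  | rhs :: rest =>
    if cfgCheck grammar rhs.toList nv then some (cfgGather grammar rhs.toList nv [])
    else cfgLoop grammar rest nv
termination_by (countFresh grammar nv, 2, rhss.length)
decreasing_by
  · exact Prod.Lex.right _ (Prod.Lex.left _ _ (by omega))
  · exact Prod.Lex.right _ (Prod.Lex.left _ _ (by omega))
  · exact Prod.Lex.right _ (Prod.Lex.right _ (by simp))

-- A's 'all([None != cfgempty(...) for r in rhs])' (same value; Python builds the whole list first)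
def cfgCheck (grammar : List (String × String)) (cs : List Char) (nv : List String) : Bool :=
  match cs with
  | [] => true
  | c :: rest => (cfgempty grammar c.toString nv).isSome && cfgCheck grammar rest nv
termination_by (countFresh grammar nv, 1, cs.length)
decreasing_by
  · exact Prod.Lex.right _ (Prod.Lex.left _ _ (by omega))
  · exact Prod.Lex.right _ (Prod.Lex.right _ (by simp))

-- A's gather loop 'result = result + cfgempty(...)'; getD [] is unreachable when the
-- check passed (Python would raise TypeError on a None there, but A only gathers after cfgCheck)
def cfgGather (grammar : List (String × String)) (cs : List Char) (nv : List String) (acc : List String) : List String :=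
  match cs with
  | [] => acc
  | c :: rest => cfgGather grammar rest nv (acc ++ (cfgempty grammar c.toString nv).getD [])
termination_by (countFresh grammar nv, 1, cs.length)
decreasing_by
  · exact Prod.Lex.right _ (Prod.Lex.left _ _ (by omega))
  · exact Prod.Lex.right _ (Prod.Lex.right _ (by simp))
end

-- ===== PORT B =====
mutual
-- port of B: build the matching-rule list once, terminal iff it is empty, then a
-- single accumulating pass per rule that stops at the first underivable part
def cfgempty_alt (grammar : List (String × String)) (symbol : String) (visited : List String) : Option (List String) :=
  if _h1 : symbol ∈ visited then none
  else
    -- Source B binds 'rules' once; inlined here (same value) so the termination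
    -- argument can cite the if-condition
    if _h2 : ((grammar.filter (fun r => r.1 == symbol)).map Prod.snd).isEmpty = true then some [symbol]
    else altLoop grammar ((grammar.filter (fun r => r.1 == symbol)).map Prod.snd) (visited ++ [symbol])
termination_by (countFresh grammar visited, 0, 0)
decreasing_by
  refine Prod.Lex.left _ _ ?_
  exact countFresh_lt_of_rules grammar visited symbol _h1 _h2

-- B's 'for rhs in rules' loop with for-else
def altLoop (grammar : List (String × String)) (rhss : List String) (nv : List String) : Option (List String) :=
  match rhss with
  | [] => none
  | rhs :: rest =>
    match altParts grammar rhs.toList nv [] with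
    | some parts => some parts
    | none => altLoop grammar rest nv
termination_by (countFresh grammar nv, 2, rhss.length)
decreasing_by
  · exact Prod.Lex.right _ (Prod.Lex.left _ _ (by omega))
  · exact Prod.Lex.right _ (Prod.Lex.right _ (by simp))

-- B's inner loop: derive each part once, extend the accumulator, break (none) on failure
def altParts (grammar : List (String × String)) (cs : List Char) (nv : List String) (acc : List String) : Option (List String) :=
  match cs with
  | [] => some acc
  | c :: rest =>
    match cfgempty_alt grammar c.toString nv with
    | none => none
    | some sub => altParts grammar rest nv (acc ++ sub)
termination_by (countFresh grammar nv, 1, cs.length)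
decreasing_by
  · exact Prod.Lex.right _ (Prod.Lex.left _ _ (by omega))
  · exact Prod.Lex.right _ (Prod.Lex.right _ (by simp))
end

-- ===== PRECONDITION & SPEC =====
def Spec_cfgempty (grammar : List (String × String)) (symbol : String) (visited : List String) (out : Option (List String)) : Prop := out = cfgempty_alt grammar symbol visited
instance (grammar : List (String × String)) (symbol : String) (visited : List String) (out : Option (List String)) : Decidable (Spec_cfgempty grammar symbol visited out) := by unfold Spec_cfgempty; infer_instance

-- ===== CLAIM (what is proved, stated in full; the proofs are below) =====
def Claim_equal_cfgempty : Prop := ∀ (grammar : List (String × String)) (symbol : String) (visited : List String), Dom_cfgempty grammar symbol visited → Spec_cfgempty grammar symbol visited (cfgempty grammar symbol visited)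

-- ===== LEMMAS AND PROOFS =====

theorem parts_eq (g : List (String × String)) (cs : List Char) (nv : List String)
    (h : ∀ s, cfgempty_alt g s nv = cfgempty g s nv) :
    ∀ acc, altParts g cs nv acc =
      if cfgCheck g cs nv then some (cfgGather g cs nv acc) else none := by
  induction cs with
  | nil => intro acc; simp [altParts, cfgCheck, cfgGather]
  | cons c rest ih =>
    intro acc
    rw [altParts, h]
    cases hc : cfgempty g c.toString nv with
    | none => rw [cfgCheck, hc]; simp
    | some sub => rw [cfgCheck, cfgGather, hc]; simp [ih]

theorem loop_eq (g : List (String × String)) (rhss : List String) (nv : List String)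
    (h : ∀ s, cfgempty_alt g s nv = cfgempty g s nv) :
    altLoop g rhss nv = cfgLoop g rhss nv := by
  induction rhss with
  | nil => rw [altLoop, cfgLoop]
  | cons rhs rest ih =>
    rw [altLoop, cfgLoop, parts_eq g _ nv h]
    by_cases hch : cfgCheck g rhs.toList nv = true <;> simp [hch, ih]

theorem empty_eq (n : Nat) : ∀ (g : List (String × String)) (v : List String) (s : String),
    countFresh g v ≤ n → cfgempty g s v = cfgempty_alt g s v := by
  induction n using Nat.strong_induction_on with
  | _ n ih =>
    intro g v s hn
    rw [cfgempty, cfgempty_alt]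
    by_cases h1 : s ∈ v
    · simp [h1]
    · simp only [h1, dite_false]
      by_cases h2 : g.any (fun rule => rule.1 == s) = true
      · have hne : ((g.filter (fun r => r.1 == s)).map Prod.snd).isEmpty = false := by
          rw [rulesEmpty_iff, h2]; rfl
        have hlt : countFresh g (v ++ [s]) < countFresh g v := countFresh_lt g v s h1 h2
        have hih : ∀ s', cfgempty_alt g s' (v ++ [s]) = cfgempty g s' (v ++ [s]) := by
          intro s'
          exact (ih (countFresh g (v ++ [s])) (by omega) g (v ++ [s]) s' le_rfl).symm
        simp only [h2, not_true_eq_false, dite_false, hne, Bool.false_eq_true]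
        exact (loop_eq g _ _ hih).symm
      · have he : ((g.filter (fun r => r.1 == s)).map Prod.snd).isEmpty = true := by
          rw [rulesEmpty_iff]
          cases hany : g.any (fun rule => rule.1 == s)
          · rfl
          · exact absurd hany h2
        simp [h2, he]

-- ===== VERDICT (by name: the statement is the Claim_ definition above) =====
theorem cfgempty_spec : Claim_equal_cfgempty := by
  intro g s v _
  show cfgempty g s v = cfgempty_alt g s v
  exact empty_eq (countFresh g v) g v s le_rfl
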